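-- pv_equiv track=rewrite | github.com/over-cart/backend-side | MFRC522-python/test.py | listToNum
-- ===== SOURCE A (Python) =====
-- def listToNum(numList):
-- 	num = 0
-- 	for i in range(0,len(numList)):
-- 		if numList[i] > 255:
-- 			numList[i] = 255
-- 		elif numList[i] < 0:
-- 			numList[i] = 0
-- 		num += numList[i] << 8*i
-- 	return num
-- ===== SOURCE B (Python) =====
-- def listToNum(numList):
--     for i in range(len(numList)):
--         if numList[i] > 255:
--             numList[i] = 255
--         elif numList[i] < 0:
--             numList[i] = 0
--     return int.from_bytes(bytes(numList), 'little')
-- ===== Notes on version B (the rewrite author's own statement) =====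
-- stated objective: faster
-- what changed: B keeps the in-place clamping loop but replaces the manual shift-and-add accumulation with packing the clamped bytes and decoding them via int.from_bytes(bytes(numList), 'little').
import Mathlib
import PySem

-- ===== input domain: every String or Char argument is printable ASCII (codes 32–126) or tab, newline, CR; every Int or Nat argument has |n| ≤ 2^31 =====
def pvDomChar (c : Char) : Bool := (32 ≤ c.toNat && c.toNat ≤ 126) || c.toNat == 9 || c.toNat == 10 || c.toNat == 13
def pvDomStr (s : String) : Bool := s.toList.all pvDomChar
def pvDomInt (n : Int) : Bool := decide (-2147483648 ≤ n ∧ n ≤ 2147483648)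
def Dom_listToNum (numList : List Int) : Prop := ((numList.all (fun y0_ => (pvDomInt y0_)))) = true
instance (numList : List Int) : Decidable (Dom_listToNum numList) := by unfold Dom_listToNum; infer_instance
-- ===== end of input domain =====

-- B keeps A's in-place clamping loop but replaces the manual shift-and-add
-- accumulation with a little-endian base-256 decode of the clamped byte list
-- (int.from_bytes(bytes(numList), 'little')); equal return value proved on Dom.
-- Both A and B mutate the argument list in place in Python (same clamping
-- writes); the equivalence here is about the return value.

-- ===== PORT A =====
-- the for-loop over range(0, len(numList)) with the mutated list as state;
-- `numList[i] << 8*i` is `* 2 ^ (8*i)` (shift count is nonnegative, exact)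
def listToNumGo (lst : List Int) (num : Int) (i n : Nat) : Int :=
  if i < n then
    let lst' := if lst.getD i 0 > 255 then lst.set i 255
                else if lst.getD i 0 < 0 then lst.set i 0 else lst
    listToNumGo lst' (num + lst'.getD i 0 * 2 ^ (8 * i)) (i + 1) n
  else num
termination_by n - i

def listToNum (numList : List Int) : Int :=
  listToNumGo numList 0 0 numList.length

-- ===== PORT B =====
-- B's clamping for-loop, same in-place writes as A
def clampGo (lst : List Int) (i n : Nat) : List Int :=
  if i < n then
    clampGo (if lst.getD i 0 > 255 then lst.set i 255
             else if lst.getD i 0 < 0 then lst.set i 0 else lst) (i + 1) n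
  else lst
termination_by n - i

-- int.from_bytes(bs, 'little')
def fromBytesLE (l : List Int) : Int := l.foldr (fun b acc => b + 256 * acc) 0

def listToNum_alt (numList : List Int) : Int :=
  fromBytesLE (clampGo numList 0 numList.length)

-- ===== PRECONDITION & SPEC =====
def Spec_listToNum (numList : List Int) (out : Int) : Prop := out = listToNum_alt numList
instance (numList : List Int) (out : Int) : Decidable (Spec_listToNum numList out) := by unfold Spec_listToNum; infer_instance

-- ===== CLAIM (what is proved, stated in full; the proofs are below) =====
def Claim_equal_listToNum : Prop := ∀ (numList : List Int), Dom_listToNum numList → Spec_listToNum numList (listToNum numList)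

-- ===== LEMMAS AND PROOFS =====

-- ===== VERDICT (by name: the statement is the Claim_ definition above) =====
-- proof helpers
def pvClamp (x : Int) : Int := if x > 255 then 255 else if x < 0 then 0 else x

-- the one loop step both programs perform on the list
def pvStep (lst : List Int) (i : Nat) : List Int :=
  if lst.getD i 0 > 255 then lst.set i 255
  else if lst.getD i 0 < 0 then lst.set i 0 else lst

theorem pvStep_length (lst : List Int) (i : Nat) :
    (pvStep lst i).length = lst.length := by
  unfold pvStep; split_ifs <;> simp

theorem pvStep_drop (lst : List Int) (i : Nat) :
    (pvStep lst i).drop (i + 1) = lst.drop (i + 1) := by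
  unfold pvStep; split_ifs <;> simp [List.drop_set_of_lt (by omega : i < i + 1)]

theorem pvStep_take (lst : List Int) (i : Nat) :
    (pvStep lst i).take i = lst.take i := by
  unfold pvStep; split_ifs <;> simp [List.take_set_of_le (Nat.le_refl i)]

theorem pvStep_getD (lst : List Int) (i : Nat) (h : i < lst.length) :
    (pvStep lst i).getD i 0 = pvClamp (lst.getD i 0) := by
  unfold pvStep pvClamp
  split_ifs <;> simp [h, List.getElem_set_self]

theorem clampGo_eq (lst : List Int) (i : Nat) :
    clampGo lst i lst.length = lst.take i ++ (lst.drop i).map pvClamp := by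
  rw [clampGo]
  by_cases h : i < lst.length
  · simp only [if_pos h]
    have hrec := clampGo_eq (pvStep lst i) (i + 1)
    rw [pvStep_length] at hrec
    show clampGo (pvStep lst i) (i + 1) lst.length = _
    rw [hrec]
    have h' : i < (pvStep lst i).length := by rw [pvStep_length]; exact h
    rw [List.take_add_one, pvStep_take, pvStep_drop,
        List.getElem?_eq_getElem h', ← List.getD_eq_getElem _ 0 h', pvStep_getD lst i h,
        List.getD_eq_getElem _ 0 h, List.drop_eq_getElem_cons h]
    simp [List.drop_eq_getElem_cons (show i < (List.map pvClamp lst).length by simpa using h)]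
  · simp only [if_neg h]
    rw [List.take_of_length_le (by omega), List.drop_eq_nil_of_le (by omega)]
    simp
termination_by lst.length - i
decreasing_by rw [pvStep_length]; omega

theorem listToNumGo_eq (lst : List Int) (num : Int) (i : Nat) :
    listToNumGo lst num i lst.length
      = num + 256 ^ i * fromBytesLE ((lst.drop i).map pvClamp) := by
  rw [listToNumGo]
  by_cases h : i < lst.length
  · simp only [if_pos h]
    have hrec := listToNumGo_eq (pvStep lst i)
      (num + (pvStep lst i).getD i 0 * 2 ^ (8 * i)) (i + 1)
    rw [pvStep_length] at hrec
    show listToNumGo (pvStep lst i) (num + (pvStep lst i).getD i 0 * 2 ^ (8 * i))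
      (i + 1) lst.length = _
    rw [hrec, pvStep_drop, pvStep_getD lst i h,
        List.drop_eq_getElem_cons h, List.getD_eq_getElem _ 0 h]
    show _ = num + 256 ^ i * fromBytesLE (pvClamp lst[i] :: _)
    unfold fromBytesLE
    simp only [List.foldr_cons]
    have h2 : (2 : Int) ^ (8 * i) = 256 ^ i := by
      rw [pow_mul]; norm_num
    rw [h2]
    ring
  · simp only [if_neg h]
    rw [List.drop_eq_nil_of_le (by omega)]
    simp [fromBytesLE]
termination_by lst.length - i
decreasing_by rw [pvStep_length]; omega

theorem listToNum_spec : Claim_equal_listToNum := by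
  intro numList _
  unfold Spec_listToNum listToNum listToNum_alt
  rw [clampGo_eq, listToNumGo_eq]
  simp
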